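-- pv_equiv track=rewrite | github.com/DGTLMagician/hardcoverSync | sync.py | _cwa_status_from_tags
-- ===== SOURCE A (Python) =====
-- CWA_STATUS_TAG_ALIASES = {
--     1: ["want to read", "to read", "to-read", "toread", "want", "wishlist"],
--     2: ["currently reading", "reading", "in progress", "reading now"],
--     3: ["read", "finished", "completed"],
--     5: ["did not finish", "did not finish", "dnf", "abandoned", "dropped"],
-- }
--
-- def _cwa_status_from_tags(tags: list[str]) -> int:
--     """Infer a CWA reading status from Calibre/CWA tags."""
--     if not tags:
--         return 0
--
--     normalized = {_normalise(str(tag)) for tag in tags if tag}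
--
--     if any(alias in normalized for alias in CWA_STATUS_TAG_ALIASES[3]):
--         return 3
--     if any(alias in normalized for alias in CWA_STATUS_TAG_ALIASES[2]):
--         return 2
--     if any(alias in normalized for alias in CWA_STATUS_TAG_ALIASES[5]):
--         return 5
--     if any(alias in normalized for alias in CWA_STATUS_TAG_ALIASES[1]) or "unread" in normalized:
--         return 1
--
--     return 0
--
-- def _normalise(s: str) -> str:
--     """Lowercase + strip for fuzzy matching."""
--     return s.lower().strip() if s else ""
-- ===== SOURCE B (Python) =====
-- CWA_STATUS_TAG_ALIASES = {
--     1: ["want to read", "to read", "to-read", "toread", "want", "wishlist"],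
--     2: ["currently reading", "reading", "in progress", "reading now"],
--     3: ["read", "finished", "completed"],
--     5: ["did not finish", "did not finish", "dnf", "abandoned", "dropped"],
-- }
--
-- _STATUS_BY_ALIAS = {
--     alias: code
--     for code, aliases in CWA_STATUS_TAG_ALIASES.items()
--     for alias in aliases
-- }
-- _STATUS_BY_ALIAS["unread"] = 1
--
--
-- def _cwa_status_from_tags(tags: list[str]) -> int:
--     """Infer a CWA reading status from Calibre/CWA tags."""
--     matched = set()
--     for tag in tags:
--         code = _STATUS_BY_ALIAS.get(str(tag).lower().strip())
--         if code is not None: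
--             matched.add(code)
--     for code in (3, 2, 5, 1):
--         if code in matched:
--             return code
--     return 0
-- ===== Notes on version B (the rewrite author's own statement) =====
-- stated objective: simpler
-- what changed: Replaced A's four priority-ordered any-scans over the alias lists with a reverse-lookup dict (alias -> status code, 'unread' folded into 1) built once, a single pass over the tags collecting the set of matched codes, and a fixed priority scan over [3, 2, 5, 1].
import Mathlib
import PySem

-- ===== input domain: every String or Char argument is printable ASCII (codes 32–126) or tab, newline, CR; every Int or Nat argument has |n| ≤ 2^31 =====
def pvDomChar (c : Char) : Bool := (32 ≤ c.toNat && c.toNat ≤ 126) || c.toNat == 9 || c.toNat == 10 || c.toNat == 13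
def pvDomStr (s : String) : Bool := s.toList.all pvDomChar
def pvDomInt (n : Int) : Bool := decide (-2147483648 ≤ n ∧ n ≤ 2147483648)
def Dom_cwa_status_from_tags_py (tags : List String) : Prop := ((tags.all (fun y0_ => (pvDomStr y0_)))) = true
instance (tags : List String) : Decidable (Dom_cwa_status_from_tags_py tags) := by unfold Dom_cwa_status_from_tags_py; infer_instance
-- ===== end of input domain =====

-- B replaces A's four priority-ordered scans over the alias lists by one reverse-lookup
-- dict (alias -> status code) built once, a single pass collecting matched codes, and a
-- fixed priority scan [3,2,5,1]; objective: simpler.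

-- ===== PORT A =====
def pvAliases1 : List String := ["want to read", "to read", "to-read", "toread", "want", "wishlist"]
def pvAliases2 : List String := ["currently reading", "reading", "in progress", "reading now"]
def pvAliases3 : List String := ["read", "finished", "completed"]
def pvAliases5 : List String := ["did not finish", "did not finish", "dnf", "abandoned", "dropped"]

def pvNormalise (s : String) : String :=
  if s ≠ "" then PySem.Str.strip (PySem.Str.lower s) else ""

def cwa_status_from_tags_py (tags : List String) : Int :=
  if tags = [] then 0
  else
    let normalized : PySem.Set String :=
      PySem.Set.ofList ((tags.filter (fun t => t ≠ "")).map pvNormalise)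
    if pvAliases3.any (fun a => PySem.Set.contains normalized a) then 3
    else if pvAliases2.any (fun a => PySem.Set.contains normalized a) then 2
    else if pvAliases5.any (fun a => PySem.Set.contains normalized a) then 5
    else if pvAliases1.any (fun a => PySem.Set.contains normalized a)
            || PySem.Set.contains normalized "unread" then 1
    else 0

-- ===== PORT B =====
def pvAliasTable : List (Int × List String) :=
  [(1, pvAliases1), (2, pvAliases2), (3, pvAliases3), (5, pvAliases5)]

def pvStatusByAlias : PySem.Dict String Int :=
  (pvAliasTable.foldl
      (fun d p => p.2.foldl (fun d a => d.insert a p.1) d) PySem.Dict.empty).insert "unread" 1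

def cwa_status_from_tags_py_alt (tags : List String) : Int :=
  let matched : PySem.Set Int :=
    tags.foldl (fun acc tag =>
      match pvStatusByAlias.get? (PySem.Str.strip (PySem.Str.lower tag)) with
      | some c => PySem.Set.add acc c
      | none => acc) PySem.Set.empty
  if PySem.Set.contains matched 3 then 3
  else if PySem.Set.contains matched 2 then 2
  else if PySem.Set.contains matched 5 then 5
  else if PySem.Set.contains matched 1 then 1
  else 0

-- ===== PRECONDITION & SPEC =====
def Spec_cwa_status_from_tags_py (tags : List String) (out : Int) : Prop := out = cwa_status_from_tags_py_alt tags
instance (tags : List String) (out : Int) : Decidable (Spec_cwa_status_from_tags_py tags out) := by unfold Spec_cwa_status_from_tags_py; infer_instance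

-- ===== CLAIM (what is proved, stated in full; the proofs are below) =====
def Claim_equal_cwa_status_from_tags_py : Prop := ∀ (tags : List String), Dom_cwa_status_from_tags_py tags → Spec_cwa_status_from_tags_py tags (cwa_status_from_tags_py tags)

-- ===== LEMMAS AND PROOFS =====

-- the reverse dict, evaluated to its literal association list
theorem pvStatusByAlias_eq : pvStatusByAlias = PySem.Dict.mk
    [("want to read", 1), ("to read", 1), ("to-read", 1), ("toread", 1), ("want", 1),
     ("wishlist", 1), ("currently reading", 2), ("reading", 2), ("in progress", 2),
     ("reading now", 2), ("read", 3), ("finished", 3), ("completed", 3),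
     ("did not finish", 5), ("dnf", 5), ("abandoned", 5), ("dropped", 5), ("unread", 1)] := by
  decide

-- membership in B's matched set
theorem mem_matched (tags : List String) (acc : PySem.Set Int) (c : Int) :
    c ∈ tags.foldl (fun acc tag =>
      match pvStatusByAlias.get? (PySem.Str.strip (PySem.Str.lower tag)) with
      | some c => PySem.Set.add acc c
      | none => acc) acc
    ↔ c ∈ acc ∨ ∃ t ∈ tags, pvStatusByAlias.get? (PySem.Str.strip (PySem.Str.lower t)) = some c := by
  induction tags generalizing acc with
  | nil => simp
  | cons t ts ih =>
    simp only [List.foldl_cons]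
    rcases h : pvStatusByAlias.get? (PySem.Str.strip (PySem.Str.lower t)) with _ | v
    · rw [ih]; simp [h]
    · rw [ih]
      simp only [PySem.Set.mem_add, List.mem_cons]
      constructor
      · rintro (⟨hc | rfl⟩ | ⟨u, hu, hg⟩)
        · exact Or.inl hc
        · exact Or.inr ⟨t, Or.inl rfl, h⟩
        · exact Or.inr ⟨u, Or.inr hu, hg⟩
      · rintro (hc | ⟨u, (rfl | hu), hg⟩)
        · exact Or.inl (Or.inl hc)
        · rw [h] at hg; exact Or.inl (Or.inr (Option.some_inj.mp hg).symm)
        · exact Or.inr ⟨u, hu, hg⟩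

-- lookup characterisations of the literal reverse dict
theorem get?_eq_three (s : String) : pvStatusByAlias.get? s = some 3 ↔ s = "read" ∨ s = "finished" ∨ s = "completed" := by
  rw [pvStatusByAlias_eq]
  simp only [PySem.Dict.get?_mk_cons, beq_iff_eq]
  by_cases h0 : "want to read" = s
  · subst h0; decide
  rw [if_neg h0]
  by_cases h1 : "to read" = s
  · subst h1; decide
  rw [if_neg h1]
  by_cases h2 : "to-read" = s
  · subst h2; decide
  rw [if_neg h2]
  by_cases h3 : "toread" = s
  · subst h3; decide
  rw [if_neg h3]
  by_cases h4 : "want" = s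
  · subst h4; decide
  rw [if_neg h4]
  by_cases h5 : "wishlist" = s
  · subst h5; decide
  rw [if_neg h5]
  by_cases h6 : "currently reading" = s
  · subst h6; decide
  rw [if_neg h6]
  by_cases h7 : "reading" = s
  · subst h7; decide
  rw [if_neg h7]
  by_cases h8 : "in progress" = s
  · subst h8; decide
  rw [if_neg h8]
  by_cases h9 : "reading now" = s
  · subst h9; decide
  rw [if_neg h9]
  by_cases h10 : "read" = s
  · subst h10; decide
  rw [if_neg h10]
  by_cases h11 : "finished" = s
  · subst h11; decide
  rw [if_neg h11]
  by_cases h12 : "completed" = s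
  · subst h12; decide
  rw [if_neg h12]
  by_cases h13 : "did not finish" = s
  · subst h13; decide
  rw [if_neg h13]
  by_cases h14 : "dnf" = s
  · subst h14; decide
  rw [if_neg h14]
  by_cases h15 : "abandoned" = s
  · subst h15; decide
  rw [if_neg h15]
  by_cases h16 : "dropped" = s
  · subst h16; decide
  rw [if_neg h16]
  by_cases h17 : "unread" = s
  · subst h17; decide
  rw [if_neg h17]
  exact iff_of_false (by simp [PySem.Dict.get?]) (by rintro (rfl | rfl | rfl) <;> simp_all)

theorem get?_eq_two (s : String) : pvStatusByAlias.get? s = some 2 ↔ s = "currently reading" ∨ s = "reading" ∨ s = "in progress" ∨ s = "reading now" := by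
  rw [pvStatusByAlias_eq]
  simp only [PySem.Dict.get?_mk_cons, beq_iff_eq]
  by_cases h0 : "want to read" = s
  · subst h0; decide
  rw [if_neg h0]
  by_cases h1 : "to read" = s
  · subst h1; decide
  rw [if_neg h1]
  by_cases h2 : "to-read" = s
  · subst h2; decide
  rw [if_neg h2]
  by_cases h3 : "toread" = s
  · subst h3; decide
  rw [if_neg h3]
  by_cases h4 : "want" = s
  · subst h4; decide
  rw [if_neg h4]
  by_cases h5 : "wishlist" = s
  · subst h5; decide
  rw [if_neg h5]
  by_cases h6 : "currently reading" = s
  · subst h6; decide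
  rw [if_neg h6]
  by_cases h7 : "reading" = s
  · subst h7; decide
  rw [if_neg h7]
  by_cases h8 : "in progress" = s
  · subst h8; decide
  rw [if_neg h8]
  by_cases h9 : "reading now" = s
  · subst h9; decide
  rw [if_neg h9]
  by_cases h10 : "read" = s
  · subst h10; decide
  rw [if_neg h10]
  by_cases h11 : "finished" = s
  · subst h11; decide
  rw [if_neg h11]
  by_cases h12 : "completed" = s
  · subst h12; decide
  rw [if_neg h12]
  by_cases h13 : "did not finish" = s
  · subst h13; decide
  rw [if_neg h13]
  by_cases h14 : "dnf" = s
  · subst h14; decide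
  rw [if_neg h14]
  by_cases h15 : "abandoned" = s
  · subst h15; decide
  rw [if_neg h15]
  by_cases h16 : "dropped" = s
  · subst h16; decide
  rw [if_neg h16]
  by_cases h17 : "unread" = s
  · subst h17; decide
  rw [if_neg h17]
  exact iff_of_false (by simp [PySem.Dict.get?]) (by rintro (rfl | rfl | rfl | rfl) <;> simp_all)

theorem get?_eq_five (s : String) : pvStatusByAlias.get? s = some 5 ↔ s = "did not finish" ∨ s = "dnf" ∨ s = "abandoned" ∨ s = "dropped" := by
  rw [pvStatusByAlias_eq]
  simp only [PySem.Dict.get?_mk_cons, beq_iff_eq]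
  by_cases h0 : "want to read" = s
  · subst h0; decide
  rw [if_neg h0]
  by_cases h1 : "to read" = s
  · subst h1; decide
  rw [if_neg h1]
  by_cases h2 : "to-read" = s
  · subst h2; decide
  rw [if_neg h2]
  by_cases h3 : "toread" = s
  · subst h3; decide
  rw [if_neg h3]
  by_cases h4 : "want" = s
  · subst h4; decide
  rw [if_neg h4]
  by_cases h5 : "wishlist" = s
  · subst h5; decide
  rw [if_neg h5]
  by_cases h6 : "currently reading" = s
  · subst h6; decide
  rw [if_neg h6]
  by_cases h7 : "reading" = s
  · subst h7; decide
  rw [if_neg h7]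
  by_cases h8 : "in progress" = s
  · subst h8; decide
  rw [if_neg h8]
  by_cases h9 : "reading now" = s
  · subst h9; decide
  rw [if_neg h9]
  by_cases h10 : "read" = s
  · subst h10; decide
  rw [if_neg h10]
  by_cases h11 : "finished" = s
  · subst h11; decide
  rw [if_neg h11]
  by_cases h12 : "completed" = s
  · subst h12; decide
  rw [if_neg h12]
  by_cases h13 : "did not finish" = s
  · subst h13; decide
  rw [if_neg h13]
  by_cases h14 : "dnf" = s
  · subst h14; decide
  rw [if_neg h14]
  by_cases h15 : "abandoned" = s
  · subst h15; decide
  rw [if_neg h15]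
  by_cases h16 : "dropped" = s
  · subst h16; decide
  rw [if_neg h16]
  by_cases h17 : "unread" = s
  · subst h17; decide
  rw [if_neg h17]
  exact iff_of_false (by simp [PySem.Dict.get?]) (by rintro (rfl | rfl | rfl | rfl) <;> simp_all)

theorem get?_eq_one (s : String) : pvStatusByAlias.get? s = some 1 ↔ s = "want to read" ∨ s = "to read" ∨ s = "to-read" ∨ s = "toread" ∨ s = "want" ∨ s = "wishlist" ∨ s = "unread" := by
  rw [pvStatusByAlias_eq]
  simp only [PySem.Dict.get?_mk_cons, beq_iff_eq]
  by_cases h0 : "want to read" = s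
  · subst h0; decide
  rw [if_neg h0]
  by_cases h1 : "to read" = s
  · subst h1; decide
  rw [if_neg h1]
  by_cases h2 : "to-read" = s
  · subst h2; decide
  rw [if_neg h2]
  by_cases h3 : "toread" = s
  · subst h3; decide
  rw [if_neg h3]
  by_cases h4 : "want" = s
  · subst h4; decide
  rw [if_neg h4]
  by_cases h5 : "wishlist" = s
  · subst h5; decide
  rw [if_neg h5]
  by_cases h6 : "currently reading" = s
  · subst h6; decide
  rw [if_neg h6]
  by_cases h7 : "reading" = s
  · subst h7; decide
  rw [if_neg h7]
  by_cases h8 : "in progress" = s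
  · subst h8; decide
  rw [if_neg h8]
  by_cases h9 : "reading now" = s
  · subst h9; decide
  rw [if_neg h9]
  by_cases h10 : "read" = s
  · subst h10; decide
  rw [if_neg h10]
  by_cases h11 : "finished" = s
  · subst h11; decide
  rw [if_neg h11]
  by_cases h12 : "completed" = s
  · subst h12; decide
  rw [if_neg h12]
  by_cases h13 : "did not finish" = s
  · subst h13; decide
  rw [if_neg h13]
  by_cases h14 : "dnf" = s
  · subst h14; decide
  rw [if_neg h14]
  by_cases h15 : "abandoned" = s
  · subst h15; decide
  rw [if_neg h15]
  by_cases h16 : "dropped" = s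
  · subst h16; decide
  rw [if_neg h16]
  by_cases h17 : "unread" = s
  · subst h17; decide
  rw [if_neg h17]
  exact iff_of_false (by simp [PySem.Dict.get?]) (by rintro (rfl | rfl | rfl | rfl | rfl | rfl | rfl) <;> simp_all)

-- A's any-scan over an alias list coincides with B's matched-set membership
theorem pvNormalise_eq_of_ne {t : String} (h : t ≠ "") :
    pvNormalise t = PySem.Str.strip (PySem.Str.lower t) := by
  simp only [pvNormalise]
  exact if_pos h

theorem cond_eq (tags : List String) (c : Int) (al : List String)
    (hal : ∀ s, pvStatusByAlias.get? s = some c ↔ s ∈ al) (hne : "" ∉ al) :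
    (al.any (fun a => PySem.Set.contains
        (PySem.Set.ofList ((tags.filter (fun t => t ≠ "")).map pvNormalise)) a))
    = PySem.Set.contains
        (tags.foldl (fun acc tag =>
          match pvStatusByAlias.get? (PySem.Str.strip (PySem.Str.lower tag)) with
          | some c => PySem.Set.add acc c
          | none => acc) PySem.Set.empty) c := by
  have h1 : (al.any (fun a => PySem.Set.contains
      (PySem.Set.ofList ((tags.filter (fun t => t ≠ "")).map pvNormalise)) a) = true)
      ↔ ∃ t ∈ tags, pvStatusByAlias.get? (PySem.Str.strip (PySem.Str.lower t)) = some c := by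
    simp only [List.any_eq_true, PySem.Set.contains_iff, PySem.Set.mem_ofList, List.mem_map,
      List.mem_filter]
    constructor
    · rintro ⟨a, ha, t, ⟨ht, htne⟩, rfl⟩
      refine ⟨t, ht, ?_⟩
      rw [hal, ← pvNormalise_eq_of_ne (of_decide_eq_true htne)]
      exact ha
    · rintro ⟨t, ht, hg⟩
      rw [hal] at hg
      have htne : t ≠ "" := by
        rintro rfl
        exact hne (by simpa using hg)
      exact ⟨_, hg, t, ⟨ht, decide_eq_true htne⟩, pvNormalise_eq_of_ne htne⟩
  have h2 : (PySem.Set.contains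
      (tags.foldl (fun acc tag =>
        match pvStatusByAlias.get? (PySem.Str.strip (PySem.Str.lower tag)) with
        | some c => PySem.Set.add acc c
        | none => acc) PySem.Set.empty) c = true)
      ↔ ∃ t ∈ tags, pvStatusByAlias.get? (PySem.Str.strip (PySem.Str.lower t)) = some c := by
    rw [PySem.Set.contains_iff, mem_matched]
    simp [PySem.Set.empty]
  have h3 := h1.trans h2.symm
  by_cases hA : (al.any (fun a => PySem.Set.contains
      (PySem.Set.ofList ((tags.filter (fun t => t ≠ "")).map pvNormalise)) a)) = true
  · rw [hA]
    exact (h3.mp hA).symm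
  · rw [Bool.eq_false_iff.mpr hA, Bool.eq_false_iff.mpr (fun hB => hA (h3.mpr hB))]

-- ===== VERDICT (by name: the statement is the Claim_ definition above) =====
set_option maxHeartbeats 1000000 in
theorem cwa_status_from_tags_py_spec : Claim_equal_cwa_status_from_tags_py := by
  intro tags _
  unfold Spec_cwa_status_from_tags_py
  rcases eq_or_ne tags [] with rfl | h
  · decide
  · simp only [cwa_status_from_tags_py, cwa_status_from_tags_py_alt, if_neg h]
    have hone : (pvAliases1.any (fun a => PySem.Set.contains
        (PySem.Set.ofList ((tags.filter (fun t => t ≠ "")).map pvNormalise)) a)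
        || PySem.Set.contains
            (PySem.Set.ofList ((tags.filter (fun t => t ≠ "")).map pvNormalise)) "unread")
        = ((pvAliases1 ++ ["unread"]).any (fun a => PySem.Set.contains
        (PySem.Set.ofList ((tags.filter (fun t => t ≠ "")).map pvNormalise)) a)) := by
      simp [List.any_append]
    rw [cond_eq tags 3 pvAliases3 (by intro s; rw [get?_eq_three]; simp [pvAliases3]) (by decide),
        cond_eq tags 2 pvAliases2 (by intro s; rw [get?_eq_two]; simp [pvAliases2]) (by decide),
        cond_eq tags 5 pvAliases5 (by intro s; rw [get?_eq_five]; simp [pvAliases5]) (by decide),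
        hone, cond_eq tags 1 (pvAliases1 ++ ["unread"]) (by intro s; rw [get?_eq_one]; simp [pvAliases1]) (by decide)]
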